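-- pv_equiv track=rewrite | github.com/pcf566/kite-CFD-python-cluster-flow | kite-cfd/clurm/2/unsteady_solver.py | _normalize_report_defs
-- ===== SOURCE A (Python) =====
-- from typing import Any, Dict, List
--
-- def _normalize_report_defs(defs: List[str]) -> List[str]:
--     preferred_order = ["fx", "fy", "fz", "mx", "my", "mz", "momx", "momy", "momz"]
--     present = set(defs)
--     ordered = [name for name in preferred_order if name in present]
--     # 只允许一种力矩命名风格，优先沿用检测到的风格
--     if any(name in present for name in ["momx", "momy", "momz"]):
--         ordered = [name for name in ordered if name not in {"mx", "my", "mz"}]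
--     elif any(name in present for name in ["mx", "my", "mz"]):
--         ordered = [name for name in ordered if name not in {"momx", "momy", "momz"}]
--     if not any(name in ordered for name in ["fx", "fy", "fz"]):
--         ordered = ["fx", "fy", "fz"] + ordered
--     return ordered
-- ===== SOURCE B (Python) =====
-- _BITS = {"fx": 1, "fy": 2, "fz": 4, "mx": 8, "my": 16, "mz": 32,
--          "momx": 64, "momy": 128, "momz": 256}
--
-- def _normalize_report_defs(defs):
--     mask = 0
--     for d in defs:
--         mask |= _BITS.get(d, 0)
--     if mask & 7 == 0:        # no force components -> default to all three
--         mask |= 7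
--     if mask & 448:           # any mom* present -> drop the mx/my/mz style
--         mask &= 511 ^ 56
--     return [name for name, bit in _BITS.items() if mask & bit]
-- ===== Notes on version B (the rewrite author's own statement) =====
-- stated objective: alternative
-- what changed: B encodes the nine recognised names as bits in a single integer mask (one OR per element), applies the forces-default and moment-style rules as two bit operations on the mask, and decodes the result from the bit table, instead of A's build-ordered-string-list-then-prune-the-unused-moment-style-then-prepend list processing.
import Mathlib
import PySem

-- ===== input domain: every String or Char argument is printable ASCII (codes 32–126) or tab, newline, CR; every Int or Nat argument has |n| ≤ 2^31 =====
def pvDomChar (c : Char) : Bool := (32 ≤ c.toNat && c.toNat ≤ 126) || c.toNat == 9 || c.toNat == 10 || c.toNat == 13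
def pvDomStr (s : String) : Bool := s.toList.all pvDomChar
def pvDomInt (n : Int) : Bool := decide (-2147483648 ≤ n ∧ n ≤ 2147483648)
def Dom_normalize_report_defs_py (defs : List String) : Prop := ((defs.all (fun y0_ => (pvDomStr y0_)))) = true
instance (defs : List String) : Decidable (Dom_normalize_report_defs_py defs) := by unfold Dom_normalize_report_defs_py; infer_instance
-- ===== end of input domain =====

-- B replaces A's build-ordered-list-then-prune-set-logic by a 9-bit bitmask: one pass ORs a
-- per-name bit for each element, two bit operations apply the defaulting and moment-style rules,
-- and the result is decoded from the bit table; objective: alternative (same O(n) cost).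

-- ===== PORT A =====
def normalize_report_defs_py (defs : List String) : List String :=
  let preferred_order : List String := ["fx", "fy", "fz", "mx", "my", "mz", "momx", "momy", "momz"]
  let present : PySem.Set String := PySem.Set.ofList defs
  let ordered := preferred_order.filter (fun name => PySem.Set.contains present name)
  let ordered :=
    if (["momx", "momy", "momz"] : List String).any (fun name => PySem.Set.contains present name) then
      ordered.filter (fun name => !(["mx", "my", "mz"] : List String).contains name)
    else if (["mx", "my", "mz"] : List String).any (fun name => PySem.Set.contains present name) then
      ordered.filter (fun name => !(["momx", "momy", "momz"] : List String).contains name)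
    else ordered
  if !(["fx", "fy", "fz"] : List String).any (fun name => ordered.contains name) then
    ["fx", "fy", "fz"] ++ ordered
  else
    ordered

-- ===== PORT B =====
-- the module-level table _BITS (a Python dict literal)
def pvBITS : PySem.Dict String Nat :=
  PySem.Dict.ofList [("fx",1),("fy",2),("fz",4),("mx",8),("my",16),("mz",32),("momx",64),("momy",128),("momz",256)]

def normalize_report_defs_py_alt (defs : List String) : List String :=
  let mask := defs.foldl (fun m d => m ||| PySem.Dict.getD pvBITS d 0) 0
  let mask := if mask &&& 7 == 0 then mask ||| 7 else mask
  let mask := if mask &&& 448 != 0 then mask &&& (511 ^^^ 56) else mask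
  (pvBITS.items.filter (fun p => mask &&& p.2 != 0)).map Prod.fst

-- ===== PRECONDITION & SPEC =====
def Spec_normalize_report_defs_py (defs : List String) (out : List String) : Prop := out = normalize_report_defs_py_alt defs
instance (defs : List String) (out : List String) : Decidable (Spec_normalize_report_defs_py defs out) := by unfold Spec_normalize_report_defs_py; infer_instance

-- ===== CLAIM (what is proved, stated in full; the proofs are below) =====
def Claim_equal_normalize_report_defs_py : Prop := ∀ (defs : List String), Dom_normalize_report_defs_py defs → Spec_normalize_report_defs_py defs (normalize_report_defs_py defs)

-- ===== LEMMAS AND PROOFS =====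

theorem pv_contains_ofList (defs : List String) (n : String) :
    PySem.Set.contains (PySem.Set.ofList defs) n = defs.contains n := by
  simp [PySem.Set.mem_ofList]

-- the mask a list of names accumulates, as a function of which of the nine names occur
def pvM (b1 b2 b3 b4 b5 b6 b7 b8 b9 : Bool) : Nat :=
  (cond b1 1 0) ||| (cond b2 2 0) ||| (cond b3 4 0) ||| (cond b4 8 0) ||| (cond b5 16 0) |||
  (cond b6 32 0) ||| (cond b7 64 0) ||| (cond b8 128 0) ||| (cond b9 256 0)

theorem pv_getD (d : String) : PySem.Dict.getD pvBITS d 0 =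
    (if d == "fx" then 1 else if d == "fy" then 2 else if d == "fz" then 4
     else if d == "mx" then 8 else if d == "my" then 16 else if d == "mz" then 32
     else if d == "momx" then 64 else if d == "momy" then 128 else if d == "momz" then 256 else 0) := by
  have hb : pvBITS = PySem.Dict.mk [("fx",1),("fy",2),("fz",4),("mx",8),("my",16),("mz",32),("momx",64),("momy",128),("momz",256)] := by rfl
  have e : ∀ a b : String, (a == b) = (b == a) := fun a b => by simp [BEq.comm]
  rw [hb, PySem.Dict.getD_eq_get?_getD]
  simp only [PySem.Dict.get?_mk_cons, e _ d]
  by_cases h1 : d == "fx"; · simp [h1]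
  by_cases h2 : d == "fy"; · simp [h1, h2]
  by_cases h3 : d == "fz"; · simp [h1, h2, h3]
  by_cases h4 : d == "mx"; · simp [h1, h2, h3, h4]
  by_cases h5 : d == "my"; · simp [h1, h2, h3, h4, h5]
  by_cases h6 : d == "mz"; · simp [h1, h2, h3, h4, h5, h6]
  by_cases h7 : d == "momx"; · simp [h1, h2, h3, h4, h5, h6, h7]
  by_cases h8 : d == "momy"; · simp [h1, h2, h3, h4, h5, h6, h7, h8]
  by_cases h9 : d == "momz"; · simp [h1, h2, h3, h4, h5, h6, h7, h8, h9]
  simp [h1, h2, h3, h4, h5, h6, h7, h8, h9, PySem.Dict.get?]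

-- ORing one element's bit updates the corresponding component of pvM
theorem pv_step (d : String) (b1 b2 b3 b4 b5 b6 b7 b8 b9 : Bool) :
    PySem.Dict.getD pvBITS d 0 ||| pvM b1 b2 b3 b4 b5 b6 b7 b8 b9 =
    pvM (("fx" == d) || b1) (("fy" == d) || b2) (("fz" == d) || b3) (("mx" == d) || b4)
        (("my" == d) || b5) (("mz" == d) || b6) (("momx" == d) || b7) (("momy" == d) || b8) (("momz" == d) || b9) := by
  rw [pv_getD]
  by_cases h1 : d = "fx"
  · subst h1; revert b1 b2 b3 b4 b5 b6 b7 b8 b9; decide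
  by_cases h2 : d = "fy"
  · subst h2; revert b1 b2 b3 b4 b5 b6 b7 b8 b9; decide
  by_cases h3 : d = "fz"
  · subst h3; revert b1 b2 b3 b4 b5 b6 b7 b8 b9; decide
  by_cases h4 : d = "mx"
  · subst h4; revert b1 b2 b3 b4 b5 b6 b7 b8 b9; decide
  by_cases h5 : d = "my"
  · subst h5; revert b1 b2 b3 b4 b5 b6 b7 b8 b9; decide
  by_cases h6 : d = "mz"
  · subst h6; revert b1 b2 b3 b4 b5 b6 b7 b8 b9; decide
  by_cases h7 : d = "momx"
  · subst h7; revert b1 b2 b3 b4 b5 b6 b7 b8 b9; decide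
  by_cases h8 : d = "momy"
  · subst h8; revert b1 b2 b3 b4 b5 b6 b7 b8 b9; decide
  by_cases h9 : d = "momz"
  · subst h9; revert b1 b2 b3 b4 b5 b6 b7 b8 b9; decide
  have e : ∀ s : String, d ≠ s → (s == d) = false := fun s h => by
    simp [BEq.comm]; exact fun hh => h hh
  simp [e _ h1, e _ h2, e _ h3, e _ h4, e _ h5, e _ h6, e _ h7, e _ h8, e _ h9,
        beq_iff_eq, h1, h2, h3, h4, h5, h6, h7, h8, h9]

-- B's accumulation loop computes exactly pvM of the nine membership facts
theorem pv_mask (defs : List String) (m : Nat) :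
    defs.foldl (fun m d => m ||| PySem.Dict.getD pvBITS d 0) m =
    m ||| pvM (defs.contains "fx") (defs.contains "fy") (defs.contains "fz") (defs.contains "mx")
              (defs.contains "my") (defs.contains "mz") (defs.contains "momx") (defs.contains "momy") (defs.contains "momz") := by
  induction defs generalizing m with
  | nil => simp [pvM]
  | cons d ds ih =>
    simp only [List.foldl_cons, ih, List.contains_cons]
    rw [Nat.or_assoc, pv_step]

-- after abstracting membership, the two programs are a finite boolean case analysis
set_option maxHeartbeats 4000000 in
theorem pv_key (c : String → Bool) :
    (let preferred_order : List String := ["fx", "fy", "fz", "mx", "my", "mz", "momx", "momy", "momz"]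
     let ordered := preferred_order.filter (fun name => c name)
     let ordered :=
       if (["momx", "momy", "momz"] : List String).any (fun name => c name) then
         ordered.filter (fun name => !(["mx", "my", "mz"] : List String).contains name)
       else if (["mx", "my", "mz"] : List String).any (fun name => c name) then
         ordered.filter (fun name => !(["momx", "momy", "momz"] : List String).contains name)
       else ordered
     if !(["fx", "fy", "fz"] : List String).any (fun name => ordered.contains name) then
       ["fx", "fy", "fz"] ++ ordered
     else ordered)
    =
    (let mask := pvM (c "fx") (c "fy") (c "fz") (c "mx") (c "my") (c "mz") (c "momx") (c "momy") (c "momz")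
     let mask := if mask &&& 7 == 0 then mask ||| 7 else mask
     let mask := if mask &&& 448 != 0 then mask &&& (511 ^^^ 56) else mask
     (pvBITS.items.filter (fun p => mask &&& p.2 != 0)).map Prod.fst) := by
  cases h1 : c "fx" <;> cases h2 : c "fy" <;> cases h3 : c "fz" <;> cases h4 : c "mx" <;>
    cases h5 : c "my" <;> cases h6 : c "mz" <;> cases h7 : c "momx" <;> cases h8 : c "momy" <;>
    cases h9 : c "momz" <;> simp [h1, h2, h3, h4, h5, h6, h7, h8, h9, pvM, pvBITS, PySem.Dict.ofList] <;> decide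

-- ===== VERDICT (by name: the statement is the Claim_ definition above) =====
theorem normalize_report_defs_py_spec : Claim_equal_normalize_report_defs_py := by
  intro defs _
  unfold Spec_normalize_report_defs_py normalize_report_defs_py normalize_report_defs_py_alt
  simp only [pv_contains_ofList, pv_mask, Nat.zero_or]
  exact pv_key (fun n => defs.contains n)
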